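-- pv_equiv track=rewrite | github.com/yasseresi/bookbot | main.py | parcour_text
-- ===== SOURCE A (Python) =====
-- def parcour_text(text,dic) :
--     words = text.lower().split()
--     for word in words :
--         caracters = [*word]
--         for i in range(0,len(caracters)):
--             if caracters[i] in dic:
--                 dic[caracters[i]] += 1
--     return dic
-- ===== SOURCE B (Python) =====
-- def parcour_text(text, dic):
--     counts = {}
--     for ch in "".join(text.lower().split()):
--         counts[ch] = counts.get(ch, 0) + 1
--     return {k: v + counts.get(k, 0) for k, v in dic.items()}
-- ===== Notes on version B (the rewrite author's own statement) =====
-- stated objective: alternative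
-- what changed: Instead of scanning the text word by word and testing each character for dict membership, B builds one frequency table of all non-whitespace lowered characters and then maps over dic's existing entries adding the looked-up count; A mutates dic in place while B returns a fresh dict with the same keys, order and values.
import Mathlib
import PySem

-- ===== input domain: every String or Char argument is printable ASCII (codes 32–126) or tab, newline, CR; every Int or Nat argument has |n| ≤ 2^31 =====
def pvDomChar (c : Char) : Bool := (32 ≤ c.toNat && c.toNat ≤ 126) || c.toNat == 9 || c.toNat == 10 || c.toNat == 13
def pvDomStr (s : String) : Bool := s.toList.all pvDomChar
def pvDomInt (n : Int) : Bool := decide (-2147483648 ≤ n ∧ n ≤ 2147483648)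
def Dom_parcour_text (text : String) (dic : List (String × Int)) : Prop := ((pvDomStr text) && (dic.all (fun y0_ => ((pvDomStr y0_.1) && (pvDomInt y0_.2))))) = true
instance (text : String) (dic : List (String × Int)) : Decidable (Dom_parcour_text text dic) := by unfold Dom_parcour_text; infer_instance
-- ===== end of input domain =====

-- B replaces A's scan-text-and-test-membership loop by a frequency table of the text's
-- non-whitespace lowered characters looked up once per existing dict key (alternative
-- decomposition, same cost class). A mutates dic in place; B returns a fresh dict with
-- the same keys, order and values — the equivalence proved here is about the return value.


-- ===== PORT A =====
-- Python iteration over a string yields one-character strings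
def pvChr (c : Char) : String := String.ofList [c]

-- the body of A's inner loop: 'if caracters[i] in dic: dic[caracters[i]] += 1'
def pvStep (d : PySem.Dict String Int) (c : String) : PySem.Dict String Int :=
  if d.contains c then d.modify c 0 (· + 1) else d

def parcour_text (text : String) (dic : List (String × Int)) : List (String × Int) :=
  let words := PySem.Str.split₀ (PySem.Str.lower text)
  (words.foldl
    (fun d word =>
      let caracters := word.toList.map pvChr
      (PySem.List.pyRange 0 (caracters.length : Int)).foldl
        (fun d i => pvStep d (PySem.List.pyGetD caracters i "")) d)
    (PySem.Dict.mk dic)).items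

-- ===== PORT B =====
def parcour_text_alt (text : String) (dic : List (String × Int)) : List (String × Int) :=
  let joined := PySem.Str.join "" (PySem.Str.split₀ (PySem.Str.lower text))
  let counts := (joined.toList.map pvChr).foldl
    (fun d ch => d.insert ch (d.getD ch 0 + 1)) PySem.Dict.empty
  dic.map (fun kv => (kv.1, kv.2 + counts.getD kv.1 0))

-- ===== PRECONDITION & SPEC =====
-- Pre_ requires the association-list keys to be pairwise distinct: a Python dict can never
-- hold duplicate keys, so no input A actually accepts is excluded; on duplicate-key lists
-- the two ports' treatments (first-match update vs per-entry update) are both accidental.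
def Pre_parcour_text (text : String) (dic : List (String × Int)) : Prop :=
  (dic.map Prod.fst).Nodup
instance (text : String) (dic : List (String × Int)) : Decidable (Pre_parcour_text text dic) := by unfold Pre_parcour_text; infer_instance

def pvWitness_parcour_text : String × (List (String × Int)) :=
  ("Ab a!", [("a", 1), ("b", 0), ("z", 5)])

def Spec_parcour_text (text : String) (dic : List (String × Int)) (out : List (String × Int)) : Prop := out = parcour_text_alt text dic
instance (text : String) (dic : List (String × Int)) (out : List (String × Int)) : Decidable (Spec_parcour_text text dic out) := by unfold Spec_parcour_text; infer_instance

-- ===== CLAIM (what is proved, stated in full; the proofs are below) =====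
def Claim_equal_parcour_text : Prop := ∀ (text : String) (dic : List (String × Int)), Dom_parcour_text text dic → Pre_parcour_text text dic → Spec_parcour_text text dic (parcour_text text dic)

-- ===== LEMMAS AND PROOFS =====

theorem keys_pvStep (d : PySem.Dict String Int) (c : String) : (pvStep d c).keys = d.keys := by
  unfold pvStep
  split_ifs with h
  · rw [PySem.Dict.keys_modify, PySem.Dict.keys_insert_of_contains]
    exact h
  · rfl

theorem getD_pvStep (d : PySem.Dict String Int) (c k : String) :
    (pvStep d c).getD k 0 = d.getD k 0 + if k ∈ d.keys ∧ k = c then 1 else 0 := by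
  by_cases h : d.contains c = true
  · by_cases hk : k = c
    · subst hk
      have hm : k ∈ d.keys := (PySem.Dict.contains_iff_mem_keys d k).mp h
      simp [pvStep, h, PySem.Dict.getD_modify_self, hm]
    · simp [pvStep, h, PySem.Dict.getD_modify_of_ne d 0 (· + 1) hk, hk]
  · have hb : d.contains c = false := by simpa using h
    have hno : ¬ (k ∈ d.keys ∧ k = c) := by
      rintro ⟨hm, rfl⟩
      rw [(PySem.Dict.contains_iff_mem_keys d k).mpr hm] at hb
      cases hb
    simp [pvStep, hb, hno]

theorem keys_foldl_pvStep (cs : List String) (d : PySem.Dict String Int) :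
    (cs.foldl pvStep d).keys = d.keys := by
  induction cs generalizing d with
  | nil => rfl
  | cons c cs ih => simp [List.foldl_cons, ih, keys_pvStep]

theorem getD_foldl_pvStep (cs : List String) (d : PySem.Dict String Int) (k : String) :
    (cs.foldl pvStep d).getD k 0
      = d.getD k 0 + if k ∈ d.keys then (cs.count k : Int) else 0 := by
  induction cs generalizing d with
  | nil => simp
  | cons c cs ih =>
    rw [List.foldl_cons, ih, keys_pvStep, getD_pvStep, List.count_cons]
    by_cases hm : k ∈ d.keys
    · by_cases hk : k = c
      · subst hk
        simp only [hm, and_self, if_true, beq_self_eq_true]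
        push_cast
        ring
      · have hck : (c == k) = false := by simpa using fun h => hk h.symm
        simp [hm, hk, hck]
    · simp [hm]

-- a loop over words, each folding its characters, is one fold over the concatenation
theorem foldl_foldl_eq_foldl_flatMap {α β γ : Type} (l : List α) (g : α → List β)
    (f : γ → β → γ) (init : γ) :
    l.foldl (fun acc x => (g x).foldl f acc) init = (l.flatMap g).foldl f init := by
  induction l generalizing init with
  | nil => rfl
  | cons x t ih => simp [List.foldl_cons, List.flatMap_cons, List.foldl_append, ih]

theorem join_nil_eq_flatten (css : List (List Char)) :
    PySem.Chars.join [] css = css.flatten := by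
  induction css with
  | nil => rfl
  | cons c t ih =>
    cases t with
    | nil => simp [PySem.Chars.join, List.intercalate]
    | cons c' t' =>
      simp only [PySem.Chars.join, List.intercalate] at ih ⊢
      simp [List.intersperse, List.flatten] at ih ⊢
      exact ih

-- ===== VERDICT (by name: the statement is the Claim_ definition above) =====
theorem parcour_text_spec : Claim_equal_parcour_text := by
  intro text dic _ hpre
  unfold Spec_parcour_text parcour_text parcour_text_alt
  simp only []
  set words := PySem.Str.split₀ (PySem.Str.lower text) with hw
  -- both sides count the same list of one-character strings
  have hjoin : (PySem.Str.join "" words).toList.map pvChr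
      = words.flatMap (fun w => w.toList.map pvChr) := by
    rw [PySem.Str.toList_join]
    have : ("" : String).toList = [] := rfl
    rw [this, join_nil_eq_flatten]
    rw [List.map_flatten]
    rw [List.flatMap_def, List.map_map]
    rfl
  set L : List String := words.flatMap (fun w => w.toList.map pvChr) with hL
  -- A's nested loops are one pvStep-fold over L
  have hA : (words.foldl
      (fun d word =>
        let caracters := word.toList.map pvChr
        (PySem.List.pyRange 0 (caracters.length : Int)).foldl
          (fun d i => pvStep d (PySem.List.pyGetD caracters i "")) d)
      (PySem.Dict.mk dic))
      = L.foldl pvStep (PySem.Dict.mk dic) := by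
    rw [hL, ← foldl_foldl_eq_foldl_flatMap]
    apply PySem.List.foldl_congr_mem
    intro acc w _
    exact PySem.List.foldl_pyRange_zero_pyGetD' (w.toList.map pvChr) "" pvStep acc
  rw [hA]
  -- B's counter looks up the count of each key in L
  have hB : ∀ k : String,
      (((PySem.Str.join "" words).toList.map pvChr).foldl
        (fun d ch => d.insert ch (d.getD ch 0 + 1)) PySem.Dict.empty).getD k 0
      = (L.count k : Int) := by
    intro k
    rw [hjoin, PySem.Dict.getD_foldl_insert_add_one]
    have he : (PySem.Dict.empty : PySem.Dict String Int).getD k 0 = 0 := rfl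
    rw [he, zero_add]
  -- keys of the dict seen as a list
  have hkeys : (PySem.Dict.mk dic).keys = dic.map Prod.fst := by
    simp [PySem.Dict.keys]
  have hnodup : (L.foldl pvStep (PySem.Dict.mk dic)).keys.Nodup := by
    rw [keys_foldl_pvStep, hkeys]; exact hpre
  rw [PySem.Dict.items_eq_map_keys _ hnodup 0, keys_foldl_pvStep, hkeys, List.map_map]
  apply List.map_congr_left
  intro kv hkv
  have hmem : kv.1 ∈ List.map Prod.fst dic := List.mem_map_of_mem hkv
  have hitems : (kv.1, kv.2) ∈ (PySem.Dict.mk dic).items := by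
    simpa [PySem.Dict.items] using hkv
  have hget : (PySem.Dict.mk dic).getD kv.1 0 = kv.2 :=
    PySem.Dict.getD_of_mem_items _ hitems (by rw [hkeys]; exact hpre) 0
  show (kv.1, (L.foldl pvStep (PySem.Dict.mk dic)).getD kv.1 0) = _
  rw [getD_foldl_pvStep, hkeys, if_pos hmem, hget, hB kv.1]
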